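-- pv_equiv track=rewrite | github.com/Dudly01/pkmn | core/scripts/evo_chains.py | filter_pokemon
-- ===== SOURCE A (Python) =====
-- JOIN_STR = "->"
--
-- def filter_pokemon(
--     full_evo_paths: list[list[str]], pokedex: set[str]
-- ) -> list[list[str]]:
--     """Filters the evos to only include the desired pokemon.
--
--     It does not guarantee that every pokemon will have an evolution.
--     """
--     evo_chain_strings: list[str] = []
--     for row in full_evo_paths:
--         # The range of columns to keep, [start, stop)
--         valid_path_range = None
--
--         for col_idx in range(1, len(row), 2):  # Only look at the PKMN
--             pkmn = row[col_idx]
--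
--             if pkmn in pokedex:
--                 if valid_path_range is None:
--                     valid_path_range = (col_idx, col_idx + 1)
--                 valid_path_range = (valid_path_range[0], col_idx + 1)
--
--         if valid_path_range is None:
--             continue  # This row is not needed.
--
--         start, stop = valid_path_range
--
--         # Make a string to check for duplicated (sub)chains.
--         # Add pre- and postfix to avoid Mew/Mewtwo filtering.
--         chain = JOIN_STR + JOIN_STR.join(row[start:stop]) + JOIN_STR
--
--         # O(n+m) solution to make sure no (sub)chain duplications
--         # Going in reverse should result in faster hits.
--         if not any((chain in c for c in reversed(evo_chain_strings))):
--             evo_chain_strings.append(chain)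
--
--     evo_chains = [chain.split(JOIN_STR)[1:-1] for chain in evo_chain_strings]
--
--     return evo_chains
-- ===== SOURCE B (Python) =====
-- JOIN_STR = "->"
--
--
-- def filter_pokemon(full_evo_paths, pokedex):
--     # Phase 1: per row, flag the pokemon slots that are in the pokedex and
--     # cut the chain between the first and last flagged slot.
--     cands = []
--     for row in full_evo_paths:
--         flags = [row[k] in pokedex for k in range(1, len(row), 2)]
--         if True not in flags:
--             continue
--         i = flags.index(True)
--         j = len(flags) - 1 - flags[::-1].index(True)
--         cands.append(JOIN_STR + JOIN_STR.join(row[2 * i + 1:2 * j + 2]) + JOIN_STR)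
--
--     # Phase 2a: exact duplicates of an earlier chain die, via a hash set.
--     dead = []
--     seen = set()
--     for c in cands:
--         dead.append(c in seen)
--         seen.add(c)
--
--     # Phase 2b: every chain kills each later STRICTLY SHORTER chain it contains
--     # (a substring of equal length is an exact duplicate, already handled above;
--     # substring-of is transitive, so killing by any earlier chain equals A's
--     # killing by earlier accepted chains only).
--     n = len(cands)
--     for j in range(n):
--         d = cands[j]
--         for i in range(j + 1, n):
--             if len(cands[i]) < len(d) and cands[i] in d:
--                 dead[i] = True
--
--     return [c.split(JOIN_STR)[1:-1] for c, dd in zip(cands, dead) if not dd]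
-- ===== Notes on version B (the rewrite author's own statement) =====
-- stated objective: alternative
-- what changed: B replaces A's running accumulator of accepted chains (each new chain scanned against all previously accepted strings in reverse) by a staged pipeline: trim each row via a boolean flag list (first/last True index), kill exact duplicates with a hash set in one pass, then a forward marking pass in which each chain marks every LATER strictly-shorter chain it contains dead (correct because substring-of is transitive and an equal-length substring is an exact duplicate).
import Mathlib
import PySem

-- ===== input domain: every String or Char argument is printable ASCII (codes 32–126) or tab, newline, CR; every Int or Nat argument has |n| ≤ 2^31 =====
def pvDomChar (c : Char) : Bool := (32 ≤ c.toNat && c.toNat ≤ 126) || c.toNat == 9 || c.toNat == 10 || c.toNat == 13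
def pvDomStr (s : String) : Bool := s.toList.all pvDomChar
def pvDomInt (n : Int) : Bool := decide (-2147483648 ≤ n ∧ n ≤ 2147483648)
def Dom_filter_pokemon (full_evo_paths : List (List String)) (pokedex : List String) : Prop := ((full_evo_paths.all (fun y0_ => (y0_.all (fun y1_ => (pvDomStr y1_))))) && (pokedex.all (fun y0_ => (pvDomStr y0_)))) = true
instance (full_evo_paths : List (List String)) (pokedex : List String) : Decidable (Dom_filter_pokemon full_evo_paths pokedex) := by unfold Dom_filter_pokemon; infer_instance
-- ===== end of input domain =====

-- B trims rows via a flag list, kills duplicates with a hash set and then lets each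
-- chain mark later strictly-shorter contained chains dead (valid since substring-of is
-- transitive); objective: alternative decomposition, same behaviour, same asymptotic cost.

-- ===== PORT A =====
def filter_pokemon (full_evo_paths : List (List String)) (pokedex : List String) : List (List String) :=
  let evo_chain_strings : List String :=
    full_evo_paths.foldl (fun evo_chain_strings row =>
      let valid_path_range : Option (Int × Int) :=
        (PySem.List.pyRange 1 (row.length : Int) 2).foldl (fun valid_path_range col_idx =>
          let pkmn := PySem.List.pyGetD row col_idx ""
          if PySem.Set.contains pokedex pkmn then
            match valid_path_range with
            | none => some (col_idx, col_idx + 1)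
            | some r => some (r.1, col_idx + 1)
          else valid_path_range) none
      match valid_path_range with
      | none => evo_chain_strings
      | some (start, stop) =>
        let chain := "->" ++ PySem.Str.join "->" (PySem.List.slice row (some start) (some stop)) ++ "->"
        if (evo_chain_strings.reverse.any (fun c => PySem.Str.isIn chain c)) then
          evo_chain_strings
        else
          evo_chain_strings ++ [chain]) []
  evo_chain_strings.map (fun chain => PySem.List.slice ((PySem.Str.split? chain "->").getD []) (some 1) (some (-1)))

-- ===== PORT B =====
-- phase 1 of Source B: member flags of a row's pokemon slots; chain between first and last True
def rowChainFlags (row : List String) (flags : List Bool) : Option String :=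
  match PySem.List.index? flags true, PySem.List.index? flags.reverse true with
  | some i, some r =>
    some ("->" ++ PySem.Str.join "->" (PySem.List.slice row
      (some (2*(i:Int)+1)) (some (2*((flags.length - 1 - r : Nat):Int)+2))) ++ "->")
  | _, _ => none

def rowChain (row : List String) (pokedex : List String) : Option String :=
  rowChainFlags row ((PySem.List.pyRange 1 (row.length : Int) 2).map
    (fun k => PySem.Set.contains pokedex (PySem.List.pyGetD row k "")))

def filter_pokemon_alt (full_evo_paths : List (List String)) (pokedex : List String) : List (List String) :=
  let cands := full_evo_paths.filterMap (fun row => rowChain row pokedex)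
  -- phase 2a: duplicates of an earlier chain, via a set
  let dead1 := (cands.foldl (fun st c => (st.1 ++ [PySem.Set.contains st.2 c], PySem.Set.add st.2 c))
      (([] : List Bool), (PySem.Set.empty : PySem.Set String))).1
  let n : Int := (cands.length : Int)
  -- phase 2b: chain j marks every later strictly-shorter chain it contains
  let dead := (PySem.List.pyRange 0 n 1).foldl (fun dead j =>
      let d := PySem.List.pyGetD cands j ""
      (PySem.List.pyRange (j+1) n 1).foldl (fun dead i =>
        if decide (PySem.Str.len (PySem.List.pyGetD cands i "") < PySem.Str.len d)
            && PySem.Str.isIn (PySem.List.pyGetD cands i "") d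
        then PySem.List.pySetD dead i true else dead) dead) dead1
  (cands.zip dead).filterMap (fun cd =>
    if cd.2 then none
    else some (PySem.List.slice ((PySem.Str.split? cd.1 "->").getD []) (some 1) (some (-1))))

-- ===== PRECONDITION & SPEC =====
def Spec_filter_pokemon (full_evo_paths : List (List String)) (pokedex : List String) (out : List (List String)) : Prop := out = filter_pokemon_alt full_evo_paths pokedex
instance (full_evo_paths : List (List String)) (pokedex : List String) (out : List (List String)) : Decidable (Spec_filter_pokemon full_evo_paths pokedex out) := by unfold Spec_filter_pokemon; infer_instance

-- ===== CLAIM (what is proved, stated in full; the proofs are below) =====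
def Claim_equal_filter_pokemon : Prop := ∀ (full_evo_paths : List (List String)) (pokedex : List String), Dom_filter_pokemon full_evo_paths pokedex → Spec_filter_pokemon full_evo_paths pokedex (filter_pokemon full_evo_paths pokedex)

-- ===== LEMMAS AND PROOFS =====

-- the per-column membership test shared by the characterisations of both ports
def hitP (pokedex row : List String) (i : Int) : Bool :=
  PySem.Set.contains pokedex (PySem.List.pyGetD row i "")

-- canonical per-row candidate: chain over the span from first to last hit column
def candOf (pokedex row : List String) : Option String :=
  match (PySem.List.pyRange 1 (row.length : Int) 2).filter (hitP pokedex row) with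
  | [] => none
  | h :: t => some ("->" ++ PySem.Str.join "->"
      (PySem.List.slice row (some h) (some (t.getLastD h + 1))) ++ "->")

-- A's accepted-chains accumulator, abstracted over the candidate stream
def accA (acc : List String) (cs : List String) : List String :=
  cs.foldl (fun acc chain =>
    if (acc.reverse.any (fun c => PySem.Str.isIn chain c)) then acc else acc ++ [chain]) acc

theorem accA_append (cs : List String) (e : String) :
    accA [] (cs ++ [e]) =
      if ((accA [] cs).any (fun c => PySem.Str.isIn e c)) then accA [] cs
      else accA [] cs ++ [e] := by
  unfold accA
  rw [List.foldl_append]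
  simp [List.any_reverse]

theorem mem_accA (cs : List String) (x : String) (hx : x ∈ accA [] cs) : x ∈ cs := by
  induction cs using List.reverseRecOn with
  | nil => simp [accA] at hx
  | append_singleton cs e ih =>
    rw [accA_append] at hx
    split at hx
    · exact List.mem_append_left _ (ih hx)
    · rcases List.mem_append.mp hx with h | h
      · exact List.mem_append_left _ (ih h)
      · exact List.mem_append_right _ h

theorem accA_cover (cs : List String) (c : String) :
    (accA [] cs).any (fun d => PySem.Str.isIn c d) = cs.any (fun d => PySem.Str.isIn c d) := by
  induction cs using List.reverseRecOn with
  | nil => simp [accA]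
  | append_singleton cs e ih =>
    rw [accA_append]
    by_cases h : (accA [] cs).any (fun d => PySem.Str.isIn e d) = true
    · rw [if_pos h, ih, List.any_append]
      have h1 : List.any [e] (fun d => PySem.Str.isIn c d) = PySem.Str.isIn c e := by
        rw [List.any_cons, List.any_nil, Bool.or_false]
      rw [h1]
      cases hce : PySem.Str.isIn c e with
      | false => rw [Bool.or_false]
      | true =>
        obtain ⟨d, hd, hed⟩ := List.any_eq_true.mp h
        have hcd : PySem.Str.isIn c d = true := by
          rw [PySem.Str.isIn_iff_infix]
          exact ((PySem.Str.isIn_iff_infix c e).mp hce).trans ((PySem.Str.isIn_iff_infix e d).mp hed)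
        have hcs : cs.any (fun d => PySem.Str.isIn c d) = true :=
          List.any_eq_true.mpr ⟨d, mem_accA cs d hd, hcd⟩
        rw [hcs, Bool.true_or]
    · rw [if_neg h, List.any_append, List.any_append, ih]

-- A's inner per-row scan
def stepAfn (pokedex row : List String) : Option (Int × Int) → Int → Option (Int × Int) :=
  fun valid_path_range col_idx =>
    let pkmn := PySem.List.pyGetD row col_idx ""
    if PySem.Set.contains pokedex pkmn then
      match valid_path_range with
      | none => some (col_idx, col_idx + 1)
      | some r => some (r.1, col_idx + 1)
    else valid_path_range

theorem foldA_some (pokedex row : List String) (l : List Int) (a c : Int) :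
    l.foldl (stepAfn pokedex row) (some (a, c + 1))
      = some (a, (l.filter (hitP pokedex row)).getLastD c + 1) := by
  induction l generalizing c with
  | nil => rfl
  | cons i t ih =>
    by_cases h : hitP pokedex row i = true
    · simp only [List.foldl_cons, List.filter_cons_of_pos h, List.getLastD_cons]
      have : stepAfn pokedex row (some (a, c + 1)) i = some (a, i + 1) := by
        simp [stepAfn, hitP] at h ⊢; simp [h]
      rw [this, ih i]
    · simp only [Bool.not_eq_true] at h
      have hstep : stepAfn pokedex row (some (a, c + 1)) i = some (a, c + 1) := by
        simp [stepAfn, hitP] at h ⊢; simp [h]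
      have hf : List.filter (hitP pokedex row) (i :: t) = List.filter (hitP pokedex row) t :=
        List.filter_cons_of_neg (by simp [h])
      simp only [List.foldl_cons, hstep, hf, ih c]

theorem foldA_none (pokedex row : List String) (l : List Int) :
    l.foldl (stepAfn pokedex row) none
      = match l.filter (hitP pokedex row) with
        | [] => none
        | h :: t => some (h, t.getLastD h + 1) := by
  induction l with
  | nil => rfl
  | cons i t ih =>
    by_cases h : hitP pokedex row i = true
    · have hstep : stepAfn pokedex row none i = some (i, i + 1) := by
        simp [stepAfn, hitP] at h ⊢; simp [h]
      simp only [List.foldl_cons, hstep, List.filter_cons_of_pos h]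
      exact foldA_some pokedex row t i i
    · simp only [Bool.not_eq_true] at h
      have hstep : stepAfn pokedex row none i = none := by
        simp [stepAfn, hitP] at h ⊢; simp [h]
      have hf : List.filter (hitP pokedex row) (i :: t) = List.filter (hitP pokedex row) t :=
        List.filter_cons_of_neg (by simp [h])
      simp only [List.foldl_cons, hstep, hf, ih]

-- A's whole row-loop equals accA over the canonical candidate stream
theorem foldRows (pokedex : List String) (paths : List (List String)) (acc : List String) :
    paths.foldl (fun evo_chain_strings row =>
      let valid_path_range : Option (Int × Int) :=
        (PySem.List.pyRange 1 (row.length : Int) 2).foldl (stepAfn pokedex row) none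
      match valid_path_range with
      | none => evo_chain_strings
      | some (start, stop) =>
        let chain := "->" ++ PySem.Str.join "->" (PySem.List.slice row (some start) (some stop)) ++ "->"
        if (evo_chain_strings.reverse.any (fun c => PySem.Str.isIn chain c)) then
          evo_chain_strings
        else
          evo_chain_strings ++ [chain]) acc
    = accA acc (paths.filterMap (candOf pokedex)) := by
  induction paths generalizing acc with
  | nil => rfl
  | cons row t ih =>
    simp only [List.foldl_cons, List.filterMap_cons]
    rw [foldA_none]
    cases hc : (PySem.List.pyRange 1 (row.length : Int) 2).filter (hitP pokedex row) with
    | nil =>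
      rw [show candOf pokedex row = none from by simp [candOf, hc]]
      exact ih acc
    | cons h0 t0 =>
      rw [show candOf pokedex row = some ("->" ++ PySem.Str.join "->"
            (PySem.List.slice row (some h0) (some (t0.getLastD h0 + 1))) ++ "->") from by
        simp [candOf, hc]]
      unfold accA
      rw [List.foldl_cons]
      exact ih _

-- entries of range(1, n, 2)
theorem pyRange_odd_getElem (n : Int) (k : Nat) (hk : k < (PySem.List.pyRange 1 n 2).length) :
    (PySem.List.pyRange 1 n 2)[k] = 1 + 2*(k:Int) := by
  rw [List.getElem_of_eq (PySem.List.pyRange_of_pos 1 n (by norm_num)) hk]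
  simp

-- first element of a filter located by index? over the mapped flags
theorem first_filter {α : Type} (f : α → Bool) (r : List α) (h : α) (t : List α)
    (hf : r.filter f = h :: t) :
    ∃ k, k < r.length ∧ PySem.List.index? (r.map f) true = some k ∧ r.getD k h = h := by
  induction r generalizing h t with
  | nil => simp at hf
  | cons a r' ih =>
    cases hfa : f a with
    | true =>
      rw [List.filter_cons_of_pos hfa] at hf
      have ha : a = h := by injection hf
      refine ⟨0, by simp, ?_, by simpa using ha⟩
      rw [List.map_cons, hfa]
      exact PySem.List.index?_cons_self true (r'.map f)
    | false =>
      rw [List.filter_cons_of_neg (by simp [hfa])] at hf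
      obtain ⟨k, hk, hidx, hget⟩ := ih h t hf
      refine ⟨k+1, by simpa using hk, ?_, by simpa using hget⟩
      rw [List.map_cons, hfa, PySem.List.index?_cons_of_ne _ (by simp), hidx]
      rfl

-- B's rowChain computes the canonical candidate
theorem rowChain_eq (row pokedex : List String) :
    rowChain row pokedex = candOf pokedex row := by
  unfold rowChain candOf
  have hfl : (fun k => PySem.Set.contains pokedex (PySem.List.pyGetD row k ""))
      = hitP pokedex row := rfl
  rw [hfl]
  set r := PySem.List.pyRange 1 (row.length : Int) 2 with hr
  set f := hitP pokedex row with hfdef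
  cases hc : r.filter f with
  | nil =>
    have hnone : PySem.List.index? (r.map f) true = none := by
      rw [PySem.List.index?_eq_none_iff]
      intro hmem
      obtain ⟨x, hx, hfx⟩ := List.mem_map.mp hmem
      have : x ∈ r.filter f := List.mem_filter.mpr ⟨hx, hfx⟩
      rw [hc] at this; simp at this
    unfold rowChainFlags
    rw [hnone]
  | cons h0 t0 =>
    obtain ⟨i, hi, hidx, hgi⟩ := first_filter f r h0 t0 hc
    -- last element, via the reversed list
    have hne : h0 :: t0 ≠ ([] : List Int) := by simp
    have hsplit : h0 :: t0 = (h0 :: t0).dropLast ++ [(h0 :: t0).getLast hne] :=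
      (List.dropLast_append_getLast hne).symm
    have hy : (h0 :: t0).getLast hne = t0.getLastD h0 := List.getLast_eq_getLastD hne
    have hfr : r.reverse.filter f = t0.getLastD h0 :: ((h0 :: t0).dropLast).reverse := by
      rw [List.filter_reverse, hc]
      conv_lhs => rw [hsplit]
      rw [List.reverse_append, hy]
      simp
    obtain ⟨m, hm, hidxr, hgm⟩ := first_filter f r.reverse _ _ hfr
    unfold rowChainFlags
    rw [← List.map_reverse, hidx, hidxr]
    dsimp only
    rw [List.length_reverse] at hm
    -- identify the two bounds
    have hgi' : r.getD i h0 = r[i]'hi := List.getD_eq_getElem r h0 hi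
    have hval_i : h0 = 1 + 2*(i:Int) := by
      rw [hgi', pyRange_odd_getElem] at hgi; omega
    have hjlt : r.length - 1 - m < r.length := by omega
    have hgm' : r.reverse.getD m (t0.getLastD h0) = r[r.length - 1 - m]'hjlt := by
      rw [List.getD_eq_getElem _ _ (by simpa using hm)]
      rw [List.getElem_reverse]
    have hval_j : t0.getLastD h0 = 1 + 2*((r.length - 1 - m : Nat):Int) := by
      rw [hgm', pyRange_odd_getElem] at hgm; omega
    have hlenfl : (r.map f).length = r.length := by simp
    have hb1 : 2*(i:Int)+1 = h0 := by omega
    have hb2 : 2*(((r.map f).length - 1 - m : Nat):Int)+2 = t0.getLastD h0 + 1 := by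
      rw [hlenfl]; omega
    rw [hb1, hb2]

-- phase 2a spec: the duplicate flags a seen-set pass produces
def dupFlags (pre cs : List String) : List Bool :=
  match cs with
  | [] => []
  | c :: t => pre.contains c :: dupFlags (pre ++ [c]) t

theorem length_dupFlags (cs pre : List String) : (dupFlags pre cs).length = cs.length := by
  induction cs generalizing pre with
  | nil => rfl
  | cons c t ih => simp [dupFlags, ih]

theorem pass1_fold (cs pre : List String) (d : List Bool) :
    cs.foldl (fun st c => (st.1 ++ [PySem.Set.contains st.2 c], PySem.Set.add st.2 c))
        (d, PySem.Set.ofList pre)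
      = (d ++ dupFlags pre cs, PySem.Set.ofList (pre ++ cs)) := by
  induction cs generalizing pre d with
  | nil => simp [dupFlags]
  | cons c t ih =>
    rw [List.foldl_cons]
    have h1 : PySem.Set.contains (PySem.Set.ofList pre) c = pre.contains c := by
      rw [Bool.eq_iff_iff]
      simp [PySem.Set.mem_ofList]
    have h2 : PySem.Set.add (PySem.Set.ofList pre) c = PySem.Set.ofList (pre ++ [c]) :=
      (PySem.Set.ofList_append_singleton pre c).symm
    simp only [h1, h2]
    rw [ih]
    simp [dupFlags, List.append_assoc]

theorem dupFlags_getD (cs : List String) (pre : List String) (k : Nat) (hk : k < cs.length) :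
    (dupFlags pre cs).getD k false = (pre ++ cs.take k).contains (cs.getD k "") := by
  induction cs generalizing pre k with
  | nil => simp at hk
  | cons c t ih =>
    cases k with
    | zero => simp [dupFlags]
    | succ k =>
      have hk' : k < t.length := by simpa using hk
      simp only [dupFlags, List.getD_cons_succ, List.take_succ_cons]
      rw [ih (pre ++ [c]) k hk']
      simp [List.append_assoc]

-- phase 2b: folds of guarded in-place sets
theorem foldSet_length (P : Int → Bool) (l : List Int) (dead : List Bool) :
    (l.foldl (fun dd i => if P i then PySem.List.pySetD dd i true else dd) dead).length
      = dead.length := by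
  induction l generalizing dead with
  | nil => rfl
  | cons i t ih =>
    rw [List.foldl_cons]
    by_cases h : P i = true
    · rw [if_pos h, ih, PySem.List.length_pySetD]
    · rw [if_neg h, ih]

theorem foldSet_getD (P : Int → Bool) (l : List Int) (hl : ∀ i ∈ l, 0 ≤ i)
    (dead : List Bool) (k : Nat) (hk : k < dead.length) :
    (l.foldl (fun dd i => if P i then PySem.List.pySetD dd i true else dd) dead).getD k false
      = (dead.getD k false || l.any (fun i => decide (i = (k:Int)) && P i)) := by
  induction l generalizing dead with
  | nil => simp
  | cons i t ih =>
    rw [List.foldl_cons, List.any_cons]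
    have hi0 : 0 ≤ i := hl i (by simp)
    have ht : ∀ x ∈ t, 0 ≤ x := fun x hx => hl x (by simp [hx])
    by_cases hP : P i = true
    · rw [if_pos hP, hP, Bool.and_true]
      have hset : PySem.List.pySetD dead i true = dead.set i.toNat true :=
        PySem.List.pySetD_of_nonneg dead true hi0
      rw [hset, ih ht _ (by simpa using hk)]
      by_cases hik : i = (k:Int)
      · have : i.toNat = k := by omega
        rw [this]
        have hsk : (dead.set k true).getD k false = true := by
          simp [List.getD_eq_getElem?_getD, hk]
        rw [hsk]
        simp [hik]
      · have hne : i.toNat ≠ k := by omega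
        have hsk : (dead.set i.toNat true).getD k false = dead.getD k false := by
          simp [List.getD_eq_getElem?_getD, List.getElem?_set_ne hne]
        rw [hsk]
        have hd : decide (i = (k:Int)) = false := by simp [hik]
        rw [hd]
        simp
    · rw [if_neg hP, ih ht _ hk]
      have : P i = false := by simpa using hP
      rw [this, Bool.and_false, Bool.false_or]

theorem any_eq_mem (l : List Int) (k : Int) (P : Int → Bool) :
    l.any (fun i => decide (i = k) && P i) = (decide (k ∈ l) && P k) := by
  rw [Bool.eq_iff_iff]
  simp only [List.any_eq_true, Bool.and_eq_true, decide_eq_true_eq]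
  constructor
  · rintro ⟨i, hi, rfl, hP⟩; exact ⟨hi, hP⟩
  · rintro ⟨hm, hP⟩; exact ⟨k, hm, rfl, hP⟩

-- the inner-loop body of B's phase 2b, abstracted
def innerP (cs : List String) (d : String) (i : Int) : Bool :=
  decide (PySem.Str.len (PySem.List.pyGetD cs i "") < PySem.Str.len d)
    && PySem.Str.isIn (PySem.List.pyGetD cs i "") d

def outerStep (cs : List String) (dead : List Bool) (j : Int) : List Bool :=
  (PySem.List.pyRange (j+1) (cs.length : Int) 1).foldl
    (fun dd i => if innerP cs (PySem.List.pyGetD cs j "") i then PySem.List.pySetD dd i true else dd) dead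

theorem outerStep_length (cs : List String) (dead : List Bool) (j : Int) :
    (outerStep cs dead j).length = dead.length := foldSet_length _ _ _

theorem foldOuter_length (cs : List String) (l : List Int) (dead : List Bool) :
    (l.foldl (outerStep cs) dead).length = dead.length := by
  induction l generalizing dead with
  | nil => rfl
  | cons j t ih => rw [List.foldl_cons, ih, outerStep_length]

theorem foldOuter_getD (cs : List String) (l : List Int) (hl : ∀ j ∈ l, 0 ≤ j)
    (dead : List Bool) (hlen : dead.length = cs.length) (k : Nat) (hk : k < cs.length) :
    ((l.foldl (outerStep cs) dead).getD k false)
      = (dead.getD k false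
        || l.any (fun j => decide (j < (k:Int)) && innerP cs (PySem.List.pyGetD cs j "") (k:Int))) := by
  induction l generalizing dead with
  | nil => simp
  | cons j t ih =>
    rw [List.foldl_cons, List.any_cons]
    have hj0 : 0 ≤ j := hl j (by simp)
    have ht : ∀ x ∈ t, 0 ≤ x := fun x hx => hl x (by simp [hx])
    rw [ih ht _ (by rw [outerStep_length, hlen]) ]
    have hstep : (outerStep cs dead j).getD k false
        = (dead.getD k false
          || (decide (j < (k:Int)) && innerP cs (PySem.List.pyGetD cs j "") (k:Int))) := by
      unfold outerStep
      rw [foldSet_getD _ _ (fun i hi => by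
            have := (PySem.List.mem_pyRange_one (a := j+1) (b := (cs.length:Int)) (x := i)).mp hi
            omega) dead k (by omega)]
      rw [any_eq_mem]
      congr 1
      have hmem : ((k:Int) ∈ PySem.List.pyRange (j+1) (cs.length : Int) 1) ↔ (j < (k:Int)) := by
        rw [PySem.List.mem_pyRange_one]
        omega
      rw [Bool.eq_iff_iff]
      simp only [Bool.and_eq_true, decide_eq_true_eq, hmem]
    rw [hstep, Bool.or_assoc]

-- string facts used to merge the duplicate pass with the length-guarded pass
theorem isIn_refl (c : String) : PySem.Str.isIn c c = true := by
  simp only [PySem.Str.isIn_iff_infix]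
  exact List.infix_refl _

theorem isIn_length_le {c x : String} (h : PySem.Str.isIn c x = true) :
    c.toList.length ≤ x.toList.length := by
  rw [PySem.Str.isIn_iff_infix] at h
  exact h.sublist.length_le

theorem isIn_eq_of_length {c x : String} (h : PySem.Str.isIn c x = true)
    (hl : c.toList.length = x.toList.length) : c = x := by
  rw [PySem.Str.isIn_iff_infix] at h
  exact String.toList_inj.mp (h.sublist.eq_of_length hl)

def innerP2 (cs : List String) (k : Nat) (x : String) : Bool := innerP cs x (k:Int)

-- the spec flag list
def kflag (cs : List String) (k : Nat) : Bool :=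
  (cs.take k).any (fun x => PySem.Str.isIn (cs.getD k "") x)

def kf (cs : List String) : List Bool := (List.range cs.length).map (kflag cs)

theorem dead_eq_kf (cs : List String) :
    ((PySem.List.pyRange 0 (cs.length : Int) 1).foldl (outerStep cs)
        (dupFlags [] cs)) = kf cs := by
  apply List.ext_getElem
  · rw [foldOuter_length, length_dupFlags]
    simp [kf]
  · intro k h1 h2
    have hk : k < cs.length := by
      rw [foldOuter_length, length_dupFlags] at h1; exact h1
    have hkf : (kf cs)[k] = kflag cs k := by
      simp [kf]
    rw [hkf]
    rw [← List.getD_eq_getElem _ false h1]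
    rw [foldOuter_getD cs _ (fun j hj => by
          have := (PySem.List.mem_pyRange_one (a := 0) (b := (cs.length:Int)) (x := j)).mp hj
          omega) _ (length_dupFlags cs []) k hk]
    rw [dupFlags_getD cs [] k hk, List.nil_append]
    -- restrict the range of dominators to [0, k)
    have hsplit : PySem.List.pyRange 0 (cs.length : Int) 1
        = PySem.List.pyRange 0 (k:Int) 1 ++ PySem.List.pyRange (k:Int) (cs.length : Int) 1 :=
      PySem.List.pyRange_one_append 0 (k:Int) (cs.length : Int) (by omega) (by omega)
    rw [hsplit, List.any_append]
    have hhi : (PySem.List.pyRange (k:Int) (cs.length : Int) 1).any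
        (fun j => decide (j < (k:Int)) && innerP cs (PySem.List.pyGetD cs j "") (k:Int)) = false := by
      rw [List.any_eq_false]
      intro j hj
      have := (PySem.List.mem_pyRange_one (a := (k:Int)) (b := (cs.length:Int)) (x := j)).mp hj
      simp only [Bool.and_eq_true, decide_eq_true_eq, not_and]
      intro hlt
      omega
    rw [hhi, Bool.or_false]
    have hlo : (PySem.List.pyRange 0 (k:Int) 1).any
        (fun j => decide (j < (k:Int)) && innerP cs (PySem.List.pyGetD cs j "") (k:Int))
        = (cs.take k).any (fun x => innerP2 cs k x) := by
      rw [Bool.eq_iff_iff]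
      simp only [List.any_eq_true, Bool.and_eq_true, decide_eq_true_eq]
      constructor
      · rintro ⟨j, hj, hjk, hP⟩
        have hjm := (PySem.List.mem_pyRange_one (a := 0) (b := (k:Int)) (x := j)).mp hj
        have hjlen : j.toNat < cs.length := by omega
        have hx : PySem.List.pyGetD cs j "" = cs[j.toNat] := by
          rw [PySem.List.pyGetD_eq_getElem] <;> omega
        refine ⟨cs[j.toNat], ?_, ?_⟩
        · have htk : (cs.take k)[j.toNat]'(by simp; omega) = cs[j.toNat] := List.getElem_take
          exact htk ▸ List.getElem_mem _
        · rw [← hx]; exact hP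
      · rintro ⟨x, hx, hP⟩
        obtain ⟨p, hplen, hpx⟩ := List.getElem_of_mem hx
        have hpk : p < k := by have := hplen; simp at this; omega
        have hpcs : p < cs.length := by
          have := hplen; simp at this; omega
        refine ⟨(p:Int), ?_, by omega, ?_⟩
        · rw [PySem.List.mem_pyRange_one]; omega
        · have hx' : PySem.List.pyGetD cs (p:Int) "" = cs[p] := by
            rw [PySem.List.pyGetD_natCast, List.getD_eq_getElem _ _ hpcs]
          rw [hx']
          have : cs[p] = x := by rw [← hpx, List.getElem_take]
          rw [this]
          exact hP
    rw [hlo]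
    -- merge: contains + strictly-shorter-substring = substring
    rw [Bool.eq_iff_iff]
    simp only [kflag, Bool.or_eq_true, List.any_eq_true, List.contains_iff_mem,
      innerP2, innerP, Bool.and_eq_true, decide_eq_true_eq]
    constructor
    · rintro (hmem | ⟨x, hx, _, hin⟩)
      · exact ⟨_, hmem, isIn_refl _⟩
      · exact ⟨x, hx, by
          have : PySem.List.pyGetD cs ((k:Nat):Int) "" = cs.getD k "" := by
            simp
          rwa [this] at hin⟩
    · rintro ⟨x, hx, hin⟩
      by_cases heq : cs.getD k "" = x
      · exact Or.inl (heq ▸ hx)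
      · refine Or.inr ⟨x, hx, ?_, ?_⟩
        · have hle := isIn_length_le hin
          have hne : (cs.getD k "").toList.length ≠ x.toList.length := by
            intro h; exact heq (isIn_eq_of_length hin h)
          have hgetk : PySem.List.pyGetD cs ((k:Nat):Int) "" = cs.getD k "" := by simp
          rw [hgetk]
          simp only [PySem.Str.len]
          omega
        · have hgetk : PySem.List.pyGetD cs ((k:Nat):Int) "" = cs.getD k "" := by simp
          rw [hgetk]
          exact hin

-- accA equals the zip-filter against the spec flags
theorem kf_append (cs : List String) (e : String) :
    kf (cs ++ [e]) = kf cs ++ [cs.any (fun x => PySem.Str.isIn e x)] := by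
  unfold kf
  rw [List.length_append, List.length_singleton, List.range_succ, List.map_append]
  congr 1
  · apply List.map_congr_left
    intro k hk
    have hk' : k < cs.length := List.mem_range.mp hk
    unfold kflag
    rw [List.take_append_of_le_length (by omega)]
    congr 1
    rw [List.getD_eq_getElem _ _ (by simp; omega), List.getD_eq_getElem _ _ hk',
      List.getElem_append_left hk']
  · simp only [List.map_cons, List.map_nil]
    unfold kflag
    rw [List.take_left]
    congr 1
    rw [List.getD_eq_getElem _ _ (by simp)]
    simp

def pick : String × Bool → Option String := fun cd => if cd.2 then none else some cd.1

theorem accA_eq_zip (cs : List String) :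
    accA [] cs = (cs.zip (kf cs)).filterMap pick := by
  induction cs using List.reverseRecOn with
  | nil => rfl
  | append_singleton cs e ih =>
    rw [accA_append, kf_append]
    have hlen : cs.length = (kf cs).length := by simp [kf]
    rw [List.zip_append hlen, List.filterMap_append]
    rw [accA_cover, ← ih]
    by_cases h : cs.any (fun x => PySem.Str.isIn e x) = true
    · rw [if_pos h, h]
      simp [pick]
    · have hf : cs.any (fun x => PySem.Str.isIn e x) = false := by simpa using h
      rw [if_neg h, hf]
      simp [pick]

-- let-free restatement of B's port, used only to rewrite inside the final proof
def altExplicit (full_evo_paths : List (List String)) (pokedex : List String) : List (List String) :=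
  ((full_evo_paths.filterMap (fun row => rowChain row pokedex)).zip
    ((PySem.List.pyRange 0 (((full_evo_paths.filterMap (fun row => rowChain row pokedex)).length : Int)) 1).foldl
        (outerStep (full_evo_paths.filterMap (fun row => rowChain row pokedex)))
        ((full_evo_paths.filterMap (fun row => rowChain row pokedex)).foldl
          (fun st c => (st.1 ++ [PySem.Set.contains st.2 c], PySem.Set.add st.2 c))
          (([] : List Bool), (PySem.Set.empty : PySem.Set String))).1)).filterMap
    (fun cd => if cd.2 then none
      else some (PySem.List.slice ((PySem.Str.split? cd.1 "->").getD []) (some 1) (some (-1))))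

-- ===== VERDICT (by name: the statement is the Claim_ definition above) =====
theorem filter_pokemon_spec : Claim_equal_filter_pokemon := by
  intro full_evo_paths pokedex _
  unfold Spec_filter_pokemon
  have ha : filter_pokemon full_evo_paths pokedex
      = (full_evo_paths.foldl (fun evo_chain_strings row =>
          let valid_path_range : Option (Int × Int) :=
            (PySem.List.pyRange 1 (row.length : Int) 2).foldl (stepAfn pokedex row) none
          match valid_path_range with
          | none => evo_chain_strings
          | some (start, stop) =>
            let chain := "->" ++ PySem.Str.join "->" (PySem.List.slice row (some start) (some stop)) ++ "->"
            if (evo_chain_strings.reverse.any (fun c => PySem.Str.isIn chain c)) then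
              evo_chain_strings
            else
              evo_chain_strings ++ [chain]) []).map
          (fun chain => PySem.List.slice ((PySem.Str.split? chain "->").getD []) (some 1) (some (-1))) := rfl
  have hb : filter_pokemon_alt full_evo_paths pokedex = altExplicit full_evo_paths pokedex := rfl
  rw [ha, hb, foldRows]
  unfold altExplicit
  set cs := full_evo_paths.filterMap (fun row => rowChain row pokedex) with hcs
  have hcands : full_evo_paths.filterMap (candOf pokedex) = cs := by
    rw [hcs]
    symm
    apply List.filterMap_congr
    intro row _
    exact rowChain_eq row pokedex
  rw [hcands]
  have hpass1 : (cs.foldl (fun st c => (st.1 ++ [PySem.Set.contains st.2 c], PySem.Set.add st.2 c))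
      (([] : List Bool), (PySem.Set.empty : PySem.Set String))).1 = dupFlags [] cs := by
    have he : (PySem.Set.empty : PySem.Set String) = PySem.Set.ofList [] := rfl
    rw [he, pass1_fold cs [] []]
    simp
  rw [hpass1, dead_eq_kf, accA_eq_zip, List.map_filterMap]
  apply List.filterMap_congr
  intro cd _
  unfold pick
  by_cases h : cd.2 = true
  · rw [if_pos h, if_pos h]; rfl
  · rw [if_neg h, if_neg h]; rfl
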